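-- pv_equiv track=rewrite | github.com/Chen-GX/SEER | supervised_warm_up/preprocess_data/warm_state_data.py | linearize_context
-- ===== SOURCE A (Python) =====
-- def add_fullstop(sent):
--     if sent.endswith('.'):
--         return sent
--     else:
--         return sent+'.'
--
-- def linearize_context(sent_list = None, sent2id=None):
--     s = ""
--
--     sentX_sents = []
--     not_sentX_sents = []
--     for sent in sent_list:
--         if sent2id[sent].startswith('sent'):
--             sentX_sents.append(sent)
--         else:
--             not_sentX_sents.append(sent)
--
--     for sent in not_sentX_sents + sentX_sents:
--         s += f"{sent2id[sent]}: {add_fullstop(sent)} "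
--
--     return s
-- ===== SOURCE B (Python) =====
-- def add_fullstop(sent):
--     if sent.endswith('.'):
--         return sent
--     else:
--         return sent+'.'
--
-- def linearize_context(sent_list=None, sent2id=None):
--     # Stable sort on the boolean key (False < True) puts the not-'sent' group
--     # first, each group in original order; then one join builds the output.
--     ordered = sorted(sent_list, key=lambda s: sent2id[s].startswith('sent'))
--     return ''.join(f"{sent2id[s]}: {add_fullstop(s)} " for s in ordered)
-- ===== Notes on version B (the rewrite author's own statement) =====
-- stated objective: idiomatic
-- what changed: Replaces A's two partition loops and string accumulation with one stable sort on the boolean key sent2id[s].startswith('sent') (False<True puts the not-sent group first, stability keeps each group in original order) followed by a single ''.join of the formatted pieces.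
import Mathlib
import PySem

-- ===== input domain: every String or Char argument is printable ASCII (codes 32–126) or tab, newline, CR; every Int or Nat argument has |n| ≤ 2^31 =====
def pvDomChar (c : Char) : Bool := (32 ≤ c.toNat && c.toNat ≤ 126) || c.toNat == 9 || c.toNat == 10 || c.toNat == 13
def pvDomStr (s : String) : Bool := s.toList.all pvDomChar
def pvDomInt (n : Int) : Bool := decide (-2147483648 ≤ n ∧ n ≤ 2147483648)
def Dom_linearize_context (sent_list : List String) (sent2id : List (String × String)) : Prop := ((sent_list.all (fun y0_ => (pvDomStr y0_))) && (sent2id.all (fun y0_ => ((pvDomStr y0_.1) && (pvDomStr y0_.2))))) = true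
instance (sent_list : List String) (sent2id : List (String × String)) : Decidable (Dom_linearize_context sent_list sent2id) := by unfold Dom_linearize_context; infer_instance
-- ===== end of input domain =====

-- B replaces A's two partition loops by one stable sort on the boolean key
-- startswith('sent') (False < True) followed by a single join; objective: idiomatic.


-- ===== PORT A =====
def add_fullstop (sent : String) : String :=
  if PySem.Str.endswith sent "." then sent else sent ++ "."

def linearize_context (sent_list : List String) (sent2id : List (String × String)) : String :=
  let d := PySem.Dict.ofList sent2id
  -- first loop: partition into sentX_sents and not_sentX_sents (lookup sent2id[sent]; Pre_ rules out KeyError, so getD's default is never read)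
  let part := sent_list.foldl
    (fun (acc : List String × List String) sent =>
      if PySem.Str.startswith (d.getD sent "") "sent" then (acc.1 ++ [sent], acc.2)
      else (acc.1, acc.2 ++ [sent]))
    ([], [])
  -- second loop: s += f"{sent2id[sent]}: {add_fullstop(sent)} " over not_sentX_sents + sentX_sents
  (part.2 ++ part.1).foldl
    (fun s sent => s ++ (d.getD sent "" ++ ": " ++ add_fullstop sent ++ " ")) ""

-- ===== PORT B =====
-- (Source B's add_fullstop is the same function; the port shares add_fullstop above)
def linearize_context_alt (sent_list : List String) (sent2id : List (String × String)) : String :=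
  let d := PySem.Dict.ofList sent2id
  -- ordered = sorted(sent_list, key=lambda s: sent2id[s].startswith('sent'))
  let ordered := PySem.List.sorted sent_list (fun s => PySem.Str.startswith (d.getD s "") "sent") false
  -- ''.join(f"{sent2id[s]}: {add_fullstop(s)} " for s in ordered)
  String.join (ordered.map (fun s => d.getD s "" ++ ": " ++ add_fullstop s ++ " "))

-- ===== PRECONDITION & SPEC =====
-- Pre_ excludes exactly the inputs where some sentence has no entry in sent2id, on which Python A raises KeyError.
def Pre_linearize_context (sent_list : List String) (sent2id : List (String × String)) : Prop :=
  ∀ s ∈ sent_list, s ∈ sent2id.map Prod.fst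
instance (sent_list : List String) (sent2id : List (String × String)) : Decidable (Pre_linearize_context sent_list sent2id) := by unfold Pre_linearize_context; infer_instance

def pvWitness_linearize_context : List String × (List (String × String)) :=
  (["It rains", "x is 3"], [("It rains", "sent1"), ("x is 3", "int2")])

def Spec_linearize_context (sent_list : List String) (sent2id : List (String × String)) (out : String) : Prop := out = linearize_context_alt sent_list sent2id
instance (sent_list : List String) (sent2id : List (String × String)) (out : String) : Decidable (Spec_linearize_context sent_list sent2id out) := by unfold Spec_linearize_context; infer_instance

-- ===== CLAIM (what is proved, stated in full; the proofs are below) =====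
def Claim_equal_linearize_context : Prop := ∀ (sent_list : List String) (sent2id : List (String × String)), Dom_linearize_context sent_list sent2id → Pre_linearize_context sent_list sent2id → Spec_linearize_context sent_list sent2id (linearize_context sent_list sent2id)

-- ===== LEMMAS AND PROOFS =====

-- A's formatting fold, as a function of the start string: it appends to it.
theorem strfold_shift (piece : String → String) (l : List String) (s : String) :
    l.foldl (fun acc x => acc ++ piece x) s = s ++ l.foldl (fun acc x => acc ++ piece x) "" := by
  induction l generalizing s with
  | nil => simp
  | cons x xs ih =>
    simp only [List.foldl_cons]
    rw [ih (s ++ piece x), ih ("" ++ piece x)]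
    simp [String.append_assoc]

-- A's partition loop yields the two filters (appended to the accumulators).
theorem partition_fold (p : String → Bool) (l : List String) (a b : List String) :
    l.foldl (fun (acc : List String × List String) x =>
        if p x then (acc.1 ++ [x], acc.2) else (acc.1, acc.2 ++ [x])) (a, b)
      = (a ++ l.filter p, b ++ l.filter (fun x => !p x)) := by
  induction l generalizing a b with
  | nil => simp
  | cons x xs ih =>
    simp only [List.foldl_cons, List.filter_cons]
    by_cases h : p x = true <;> simp [h, ih]

-- Inserting a false-key element: it skips the false-key prefix and lands at the head of the true-key block.
theorem insertBy_false {α : Type} (key : α → Bool) (x : α) (hx : key x = false)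
    (F T : List α) (hF : ∀ y ∈ F, key y = false) (hT : ∀ y ∈ T, key y = true) :
    PySem.List.insertBy (fun a b => decide (key a < key b)) x (F ++ T) = F ++ x :: T := by
  induction F with
  | nil =>
    cases T with
    | nil => simp [PySem.List.insertBy]
    | cons t ts =>
      have := hT t (by simp)
      simp [PySem.List.insertBy, hx, this]
  | cons f fs ih =>
    have hf := hF f (by simp)
    simp only [List.cons_append, PySem.List.insertBy, hx, hf]
    simp only [decide_eq_true_eq]
    rw [if_neg (by simp)]
    rw [ih (fun y hy => hF y (by simp [hy]))]

-- Inserting a true-key element: it is appended at the end.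
theorem insertBy_true {α : Type} (key : α → Bool) (x : α) (hx : key x = true) (l : List α) :
    PySem.List.insertBy (fun a b => decide (key a < key b)) x l = l ++ [x] := by
  apply PySem.List.insertBy_of_forall_not_before
  intro y _
  simp [hx]

-- Stable sort on a boolean key = the false-key elements, then the true-key elements, each in order.
theorem sorted_bool {α : Type} (key : α → Bool) (xs : List α) :
    PySem.List.sorted xs key false = xs.filter (fun x => !key x) ++ xs.filter key := by
  rw [PySem.List.sorted_eq_foldl_insertBy]
  suffices h : ∀ (F T : List α), (∀ y ∈ F, key y = false) → (∀ y ∈ T, key y = true) →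
      xs.foldl (fun acc x => PySem.List.insertBy (fun a b => decide (key a < key b)) x acc) (F ++ T)
        = (F ++ xs.filter (fun x => !key x)) ++ (T ++ xs.filter key) by
    simpa using h [] [] (by simp) (by simp)
  induction xs with
  | nil => intro F T _ _; simp
  | cons x t ih =>
    intro F T hF hT
    simp only [List.foldl_cons, List.filter_cons]
    by_cases h : key x = true
    · rw [insertBy_true key x h, List.append_assoc F T [x]]
      rw [ih F (T ++ [x]) hF (by intro y hy; rcases List.mem_append.1 hy with h' | h'
                                 · exact hT y h'
                                 · simp at h'; subst h'; exact h)]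
      simp [h]
    · have hx : key x = false := by simpa using h
      rw [insertBy_false key x hx F T hF hT]
      have : F ++ x :: T = (F ++ [x]) ++ T := by simp
      rw [this, ih (F ++ [x]) T (by intro y hy; rcases List.mem_append.1 hy with h' | h'
                                    · exact hF y h'
                                    · simp at h'; subst h'; exact hx) hT]
      simp [hx]

-- the join fold appends to its start string.
theorem join_shift (l : List String) (s : String) :
    l.foldl (fun r x => r ++ x) s = s ++ l.foldl (fun r x => r ++ x) "" := by
  induction l generalizing s with
  | nil => simp
  | cons x xs ih =>
    simp only [List.foldl_cons]
    rw [ih (s ++ x), ih ("" ++ x)]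
    simp [String.append_assoc]

-- ''.join(map piece l) is A's accumulating format loop.
theorem join_map_eq_foldl (piece : String → String) (l : List String) :
    String.join (l.map piece) = l.foldl (fun s x => s ++ piece x) "" := by
  induction l with
  | nil => simp [String.join]
  | cons x xs ih =>
    simp only [List.map_cons, List.foldl_cons]
    rw [strfold_shift piece xs ("" ++ piece x), ← ih]
    simp only [String.join, List.foldl_cons]
    rw [join_shift (xs.map piece) ("" ++ piece x)]

-- ===== VERDICT (by name: the statement is the Claim_ definition above) =====
theorem linearize_context_spec : Claim_equal_linearize_context := by
  intro sent_list sent2id _ _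
  simp only [Spec_linearize_context, linearize_context, linearize_context_alt]
  rw [partition_fold (fun s => PySem.Str.startswith ((PySem.Dict.ofList sent2id).getD s "") "sent") sent_list [] [],
      sorted_bool (fun s => PySem.Str.startswith ((PySem.Dict.ofList sent2id).getD s "") "sent") sent_list,
      join_map_eq_foldl]
  simp
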